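-- pv_equiv track=rewrite | github.com/yanismnsr/python | algorithmes de recherche.py | meme_caractere_tri
-- ===== SOURCE A (Python) =====
-- def meme_caractere_tri(chaine1,chaine2):
--     i = 0
--     j = 0
--     while i < len(chaine1) and j < len(chaine2):
--         if chaine1[i] != chaine2[j]:
--             return False
--         while i< len(chaine1)-1 and chaine1[i] == chaine1[i+1]:
--             i +=1
--         while j < len(chaine2)-1 and chaine2[j] == chaine2[j+1] :
--             j += 1
--         i += 1
--         j += 1
--     if i == len(chaine1) and j == len(chaine2) :
--         return True
--     else :
--         return False
-- ===== SOURCE B (Python) =====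
-- def _ecrase(s):
--     out = []
--     prev = None
--     for c in s:
--         if c != prev:
--             out.append(c)
--             prev = c
--     return out
--
-- def meme_caractere_tri(chaine1, chaine2):
--     return _ecrase(chaine1) == _ecrase(chaine2)
-- ===== Notes on version B (the rewrite author's own statement) =====
-- stated objective: simpler
-- what changed: Replaces the interleaved two-pointer scan with inner duplicate-skipping while-loops by two independent single-pass run-collapses (adjacent-dedup with a prev accumulator) followed by one list equality.
import Mathlib
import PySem

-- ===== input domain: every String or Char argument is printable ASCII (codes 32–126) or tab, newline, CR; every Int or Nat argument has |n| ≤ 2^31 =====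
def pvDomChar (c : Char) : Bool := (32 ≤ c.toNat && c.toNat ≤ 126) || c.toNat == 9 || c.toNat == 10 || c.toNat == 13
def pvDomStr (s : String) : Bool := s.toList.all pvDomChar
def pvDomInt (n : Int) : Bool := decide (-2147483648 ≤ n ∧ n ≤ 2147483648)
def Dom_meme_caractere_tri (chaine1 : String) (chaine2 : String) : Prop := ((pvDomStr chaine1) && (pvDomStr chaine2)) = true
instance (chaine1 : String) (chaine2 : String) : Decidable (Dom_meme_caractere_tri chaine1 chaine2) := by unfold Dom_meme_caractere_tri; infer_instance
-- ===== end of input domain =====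

-- B collapses each string's adjacent duplicate runs independently and compares the two
-- collapsed sequences, instead of A's interleaved two-pointer scan; objective: simpler.

-- ===== PORT A =====
-- inner while: 'while i < len(chaine)-1 and chaine[i] == chaine[i+1]: i += 1'
-- (indices are provably in range wherever Python indexes, so getElem! is exact here)
def pvSkipA (l : List Char) (i : Nat) : Nat :=
  if i < l.length - 1 ∧ l[i]! = l[i+1]! then pvSkipA l (i+1) else i
termination_by l.length - i
decreasing_by omega

theorem pvSkipA_ge (l : List Char) (i : Nat) : i ≤ pvSkipA l i := by
  unfold pvSkipA
  split
  · exact le_trans (Nat.le_succ i) (pvSkipA_ge l (i+1))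
  · exact le_refl i
termination_by l.length - i
decreasing_by omega

-- outer while loop of A, on indices i, j
def pvLoopA (l1 l2 : List Char) (i j : Nat) : Bool :=
  if i < l1.length ∧ j < l2.length then
    if l1[i]! ≠ l2[j]! then false
    else pvLoopA l1 l2 (pvSkipA l1 i + 1) (pvSkipA l2 j + 1)
  else decide (i = l1.length ∧ j = l2.length)
termination_by l1.length - i
decreasing_by have := pvSkipA_ge l1 i; omega

def meme_caractere_tri (chaine1 : String) (chaine2 : String) : Bool :=
  pvLoopA chaine1.toList chaine2.toList 0 0

-- ===== PORT B =====
-- the for-loop body of _ecrase: append c when it differs from prev, update prev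
def pvEcraseStep (st : List Char × Option Char) (c : Char) : List Char × Option Char :=
  if some c ≠ st.2 then (st.1 ++ [c], some c) else st

def pvEcrase (s : String) : List Char :=
  (s.toList.foldl pvEcraseStep ([], none)).1

def meme_caractere_tri_alt (chaine1 : String) (chaine2 : String) : Bool :=
  decide (pvEcrase chaine1 = pvEcrase chaine2)   -- Python list equality '=='

-- ===== PRECONDITION & SPEC =====
def Spec_meme_caractere_tri (chaine1 : String) (chaine2 : String) (out : Bool) : Prop := out = meme_caractere_tri_alt chaine1 chaine2
instance (chaine1 : String) (chaine2 : String) (out : Bool) : Decidable (Spec_meme_caractere_tri chaine1 chaine2 out) := by unfold Spec_meme_caractere_tri; infer_instance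

-- ===== CLAIM (what is proved, stated in full; the proofs are below) =====
def Claim_equal_meme_caractere_tri : Prop := ∀ (chaine1 : String) (chaine2 : String), Dom_meme_caractere_tri chaine1 chaine2 → Spec_meme_caractere_tri chaine1 chaine2 (meme_caractere_tri chaine1 chaine2)

-- ===== LEMMAS AND PROOFS =====

-- proof-side collapse with an explicit 'previous char' parameter
def pvRc (p : Option Char) : List Char → List Char
  | [] => []
  | c :: t => if some c = p then pvRc p t else c :: pvRc (some c) t

theorem pvFold_eq_rc (l : List Char) (acc : List Char) (p : Option Char) :
    (l.foldl pvEcraseStep (acc, p)).1 = acc ++ pvRc p l := by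
  induction l generalizing acc p with
  | nil => simp [pvRc]
  | cons c t ih =>
    by_cases h : some c = p
    · simp [List.foldl, pvEcraseStep, h, pvRc, ih]
    · simp [List.foldl, pvEcraseStep, h, pvRc, ih]

theorem pvEcrase_eq (s : String) : pvEcrase s = pvRc none s.toList := by
  simpa using pvFold_eq_rc s.toList [] none

theorem pvSkipA_lt (l : List Char) (i : Nat) (h : i < l.length) : pvSkipA l i < l.length := by
  unfold pvSkipA
  split
  · next hc => exact pvSkipA_lt l (i+1) (by omega)
  · exact h
termination_by l.length - i
decreasing_by omega

theorem pvRc_skip (l : List Char) (i : Nat) (a : Char) (hi : i < l.length) (ha : l[i]! = a) :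
    pvRc (some a) (l.drop (i+1)) = pvRc none (l.drop (pvSkipA l i + 1)) := by
  unfold pvSkipA
  split
  · next hc =>
    have h1 : i + 1 < l.length := by omega
    have hget : l[i+1]! = a := by rw [← hc.2, ha]
    have hdrop : l.drop (i+1) = l[i+1] :: l.drop (i+2) := by
      rw [List.drop_eq_getElem_cons h1]
    have hget' : l[i+1] = a := by
      rwa [getElem!_pos l (i+1) h1] at hget
    rw [hdrop, hget', pvRc, if_pos rfl]
    exact pvRc_skip l (i+1) a h1 hget
  · next hc =>
    by_cases h1 : i + 1 < l.length
    · have hne : ¬ (l[i]! = l[i+1]!) := by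
        intro he; exact hc ⟨by omega, he⟩
      have hdrop : l.drop (i+1) = l[i+1] :: l.drop (i+2) := by
        rw [List.drop_eq_getElem_cons h1]
      have hne' : l[i+1] ≠ a := by
        rw [← getElem!_pos l (i+1) h1]
        intro he; exact hne (by rw [ha, he])
      rw [hdrop, pvRc, pvRc, if_neg (by simpa using hne'), if_neg (by simp)]
    · have : l.drop (i+1) = [] := List.drop_eq_nil_of_le (by omega)
      rw [this]; rfl
termination_by l.length - i
decreasing_by omega

theorem pvLoopA_eq (l1 l2 : List Char) (i j : Nat) (hi : i ≤ l1.length) (hj : j ≤ l2.length) :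
    pvLoopA l1 l2 i j = decide (pvRc none (l1.drop i) = pvRc none (l2.drop j)) := by
  unfold pvLoopA
  split
  · next h =>
    have h1 : i < l1.length := h.1
    have h2 : j < l2.length := h.2
    have d1 : l1.drop i = l1[i] :: l1.drop (i+1) := List.drop_eq_getElem_cons h1
    have d2 : l2.drop j = l2[j] :: l2.drop (j+1) := List.drop_eq_getElem_cons h2
    have g1 : l1[i]! = l1[i] := getElem!_pos l1 i h1
    have g2 : l2[j]! = l2[j] := getElem!_pos l2 j h2
    by_cases hab : l1[i]! = l2[j]!
    · rw [if_neg (by simpa using hab)]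
      have hs1 : pvSkipA l1 i + 1 ≤ l1.length := pvSkipA_lt l1 i h1
      have hs2 : pvSkipA l2 j + 1 ≤ l2.length := pvSkipA_lt l2 j h2
      rw [pvLoopA_eq l1 l2 _ _ hs1 hs2]
      rw [d1, d2, pvRc, pvRc]
      rw [if_neg (by simp), if_neg (by simp)]
      have hba : l2[j] = l1[i] := by rw [← g1, ← g2, hab]
      rw [hba, pvRc_skip l1 i l1[i] h1 g1, pvRc_skip l2 j l1[i] h2 (by rw [g2, hba])]
      simp
    · rw [if_pos hab]
      rw [d1, d2, pvRc, pvRc, if_neg (by simp), if_neg (by simp)]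
      have : l1[i] ≠ l2[j] := by rw [← g1, ← g2]; exact hab
      simp [this]
  · next h =>
    rw [not_and] at h
    by_cases h1 : i = l1.length
    · subst h1
      by_cases h2 : j = l2.length
      · subst h2; simp
      · have hj2 : j < l2.length := by omega
        have d2 : l2.drop j = l2[j] :: l2.drop (j+1) := List.drop_eq_getElem_cons hj2
        rw [d2]
        simp [pvRc, h2]
    · have hi1 : i < l1.length := by omega
      have hle : ¬ j < l2.length := h hi1
      have hj2 : j = l2.length := by omega
      subst hj2
      have d1 : l1.drop i = l1[i] :: l1.drop (i+1) := List.drop_eq_getElem_cons hi1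
      rw [d1]
      simp [pvRc, h1]
termination_by l1.length - i
decreasing_by have := pvSkipA_ge l1 i; omega

theorem pv_main (c1 c2 : String) : meme_caractere_tri c1 c2 = meme_caractere_tri_alt c1 c2 := by
  unfold meme_caractere_tri meme_caractere_tri_alt
  rw [pvLoopA_eq _ _ 0 0 (Nat.zero_le _) (Nat.zero_le _), pvEcrase_eq, pvEcrase_eq]
  simp

-- ===== VERDICT (by name: the statement is the Claim_ definition above) =====
theorem meme_caractere_tri_spec : Claim_equal_meme_caractere_tri := by
  intro c1 c2 _
  unfold Spec_meme_caractere_tri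
  exact pv_main c1 c2
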